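-- pv_equiv track=rewrite | github.com/ml5803/Data-Structures-and-Algorithms | Data Homework/Homework#3/ml5803_hw3.py | is_number_of_lowercase_even
-- ===== SOURCE A (Python) =====
-- def is_number_of_lowercase_even(s, low, high):
--     if low == high:
--         if s[low].islower():
--             return False
--         return True
--     else:
--         if s[low].islower():
--             return not(is_number_of_lowercase_even(s, low+1, high))
--         else:
--             return (is_number_of_lowercase_even(s, low + 1, high))
-- ===== SOURCE B (Python) =====
-- def is_number_of_lowercase_even(s, low, high):
--     count = 0
--     i = low
--     while True:
--         if s[i].islower():
--             count += 1
--         if i == high: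
--             break
--         i += 1
--     return count % 2 == 0
-- ===== Notes on version B (the rewrite author's own statement) =====
-- stated objective: simpler
-- what changed: Replaces the boolean-threading recursion with an iterative walk over the indices low..high that counts lowercase characters and returns the parity of the count.
import Mathlib
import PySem

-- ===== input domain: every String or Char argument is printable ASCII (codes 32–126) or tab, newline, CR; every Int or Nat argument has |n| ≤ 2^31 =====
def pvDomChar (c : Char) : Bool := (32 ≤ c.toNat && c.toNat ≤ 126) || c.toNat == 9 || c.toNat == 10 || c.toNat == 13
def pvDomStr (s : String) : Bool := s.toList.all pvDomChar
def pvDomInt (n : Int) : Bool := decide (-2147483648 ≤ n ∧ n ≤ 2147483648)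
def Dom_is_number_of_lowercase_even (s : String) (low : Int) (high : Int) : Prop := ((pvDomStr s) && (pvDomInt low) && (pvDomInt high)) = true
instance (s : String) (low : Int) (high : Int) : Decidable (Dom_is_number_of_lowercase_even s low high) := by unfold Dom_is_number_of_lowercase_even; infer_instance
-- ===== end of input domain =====

-- B replaces A's parity-flipping recursion by an iterative count-then-parity loop (objective: simpler).

-- ===== PORT A =====
-- fuel bounds the recursion for totality only; inside Pre_ it is never exhausted,
-- and a 'none' index lookup (Python IndexError) is outside Pre_ as well.
def pvARec (cs : List Char) (low high : Int) : Nat → Bool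
  | 0 => false
  | fuel + 1 =>
    if low = high then
      match PySem.List.pyGet? cs low with
      | some c => !(PySem.Chars.islower c)
      | none => false
    else
      match PySem.List.pyGet? cs low with
      | some c =>
        if PySem.Chars.islower c then !(pvARec cs (low + 1) high fuel)
        else pvARec cs (low + 1) high fuel
      | none => false

def is_number_of_lowercase_even (s : String) (low : Int) (high : Int) : Bool :=
  pvARec s.toList low high ((high - low).toNat + 1)

-- ===== PORT B =====
-- fuel bounds the while-loop for totality only; inside Pre_ it is never exhausted,
-- and a 'none' index lookup (Python IndexError) is outside Pre_ as well.
def pvBLoop (cs : List Char) (high : Int) (i : Int) (count : Int) : Nat → Int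
  | 0 => count
  | fuel + 1 =>
    match PySem.List.pyGet? cs i with
    | some c =>
      let count' := if PySem.Chars.islower c then count + 1 else count
      if i = high then count' else pvBLoop cs high (i + 1) count' fuel
    | none => count

def is_number_of_lowercase_even_alt (s : String) (low : Int) (high : Int) : Bool :=
  pvBLoop s.toList high low 0 ((high - low).toNat + 1) % 2 == 0

-- ===== PRECONDITION & SPEC =====
-- Pre_ = exactly the inputs where Python A returns: a nonempty index interval whose
-- endpoints are valid (possibly negative) Python indices into s; otherwise A raises IndexError.
def Pre_is_number_of_lowercase_even (s : String) (low : Int) (high : Int) : Prop :=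
  low ≤ high ∧ PySem.Raise.InRange s.toList.length low ∧ PySem.Raise.InRange s.toList.length high
instance (s : String) (low : Int) (high : Int) : Decidable (Pre_is_number_of_lowercase_even s low high) := by
  unfold Pre_is_number_of_lowercase_even; infer_instance

def pvWitness_is_number_of_lowercase_even : String × Int × Int := ("aBc", 0, 2)

def Spec_is_number_of_lowercase_even (s : String) (low : Int) (high : Int) (out : Bool) : Prop :=
  out = is_number_of_lowercase_even_alt s low high
instance (s : String) (low : Int) (high : Int) (out : Bool) : Decidable (Spec_is_number_of_lowercase_even s low high out) := by
  unfold Spec_is_number_of_lowercase_even; infer_instance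

-- ===== CLAIM (what is proved, stated in full; the proofs are below) =====
def Claim_equal_is_number_of_lowercase_even : Prop := ∀ (s : String) (low : Int) (high : Int), Dom_is_number_of_lowercase_even s low high → Pre_is_number_of_lowercase_even s low high → Spec_is_number_of_lowercase_even s low high (is_number_of_lowercase_even s low high)


-- ===== LEMMAS AND PROOFS =====

-- B's counting loop adds the countP of the visited range to its accumulator.
theorem pvBLoop_eq_count (cs : List Char) (high : Int) :
    ∀ (fuel : Nat) (low count : Int), low ≤ high →
      PySem.Raise.InRange cs.length low → PySem.Raise.InRange cs.length high →
      (high - low).toNat < fuel →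
      pvBLoop cs high low count fuel
        = count + ((PySem.List.pyRange low (high + 1) 1).countP
              (fun i => PySem.Chars.islower (PySem.List.pyGetD cs i ' ')) : Int) := by
  intro fuel
  induction fuel with
  | zero => intro low count _ _ _ hf; omega
  | succ n ih =>
    intro low count hle hlo hhi hf
    have hne : PySem.List.pyGet? cs low ≠ none := fun h =>
      (PySem.List.pyGet?_eq_none_iff (xs := cs) (i := low) |>.mp h) hlo
    obtain ⟨c, hc⟩ := Option.ne_none_iff_exists'.mp hne
    have hd : PySem.Chars.islower (PySem.List.pyGetD cs low ' ')
        = PySem.Chars.islower c := by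
      congr 1
      simp only [PySem.List.pyGetD, PySem.List.pyGet?] at hc ⊢
      rw [hc]; rfl
    by_cases hb : low = high
    · subst hb
      rw [PySem.List.pyRange_one_singleton]
      simp only [pvBLoop, hc, List.countP_singleton, hd]
      by_cases hl : PySem.Chars.islower c <;> simp [hl]
    · have hlow : low < high := lt_of_le_of_ne hle hb
      have hlo1 : PySem.Raise.InRange cs.length (low + 1) := by
        rcases hlo with ⟨h1, h2⟩; rcases hhi with ⟨h3, h4⟩
        exact ⟨by omega, by omega⟩
      rw [PySem.List.pyRange_one_cons (by omega)]
      simp only [pvBLoop, hc, if_neg hb, List.countP_cons, hd,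
        ih (low + 1) _ (by omega) hlo1 hhi (by omega)]
      by_cases hl : PySem.Chars.islower c <;> simp [hl]; ring

-- Inside a valid interval, A's recursion computes the parity of that countP.
theorem pvARec_eq_parity (cs : List Char) (high : Int) :
    ∀ (fuel : Nat) (low : Int), low ≤ high →
      PySem.Raise.InRange cs.length low → PySem.Raise.InRange cs.length high →
      (high - low).toNat < fuel →
      pvARec cs low high fuel
        = (((PySem.List.pyRange low (high + 1) 1).countP
              (fun i => PySem.Chars.islower (PySem.List.pyGetD cs i ' ')) : Int) % 2 == 0) := by
  intro fuel
  induction fuel with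
  | zero => intro low _ _ _ hf; omega
  | succ n ih =>
    intro low hle hlo hhi hf
    have hne : PySem.List.pyGet? cs low ≠ none := fun h =>
      (PySem.List.pyGet?_eq_none_iff (xs := cs) (i := low) |>.mp h) hlo
    obtain ⟨c, hc⟩ := Option.ne_none_iff_exists'.mp hne
    have hlo' : PySem.List.pyGet? cs low = some (PySem.List.pyGetD cs low ' ') := by
      have hd : PySem.List.pyGetD cs low ' ' = c := by
        simp only [PySem.List.pyGetD, PySem.List.pyGet?] at hc ⊢
        rw [hc]; rfl
      rw [hc, hd]
    by_cases hb : low = high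
    · subst hb
      rw [PySem.List.pyRange_one_singleton]
      simp only [pvARec, hlo', List.countP_singleton]
      by_cases hl : PySem.Chars.islower (PySem.List.pyGetD cs low ' ') <;> simp [hl]
    · have hlow : low < high := lt_of_le_of_ne hle hb
      have hlo1 : PySem.Raise.InRange cs.length (low + 1) := by
        rcases hlo with ⟨h1, h2⟩; rcases hhi with ⟨h3, h4⟩
        exact ⟨by omega, by omega⟩
      rw [PySem.List.pyRange_one_cons (by omega)]
      simp only [pvARec, if_neg hb, hlo', List.countP_cons,
        ih (low + 1) (by omega) hlo1 hhi (by omega)]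
      by_cases hl : PySem.Chars.islower (PySem.List.pyGetD cs low ' ')
      · simp only [hl, if_pos]
        set c : Nat := (PySem.List.pyRange (low + 1) (high + 1) 1).countP
          (fun i => PySem.Chars.islower (PySem.List.pyGetD cs i ' '))
        have : ((c : Int) % 2 == 0) = !(((c : Int) + 1) % 2 == 0) := by
          rcases Int.emod_two_eq_zero_or_one (c : Int) with h | h <;>
            simp [h, beq_iff_eq] <;> omega
        simp [this]
      · simp [hl]

-- ===== VERDICT (by name: the statement is the Claim_ definition above) =====
theorem is_number_of_lowercase_even_spec : Claim_equal_is_number_of_lowercase_even := by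
  intro s low high _hdom hpre
  rcases hpre with ⟨hle, hlo, hhi⟩
  unfold Spec_is_number_of_lowercase_even is_number_of_lowercase_even is_number_of_lowercase_even_alt
  rw [pvARec_eq_parity s.toList high ((high - low).toNat + 1) low hle hlo hhi (by omega),
    pvBLoop_eq_count s.toList high ((high - low).toNat + 1) low 0 hle hlo hhi (by omega)]
  simp
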